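-- pv_equiv track=rewrite | github.com/host452b/lore.skill | scripts/validate.py | body_has_heading
-- ===== SOURCE A (Python) =====
-- def body_has_heading(body: str, heading_text: str) -> bool:
--     """Return True iff the body contains a level-2 heading whose text
--     (after '## ' and optional whitespace) matches heading_text exactly,
--     case-insensitive, AND the heading is followed by at least one
--     non-blank, non-heading line of content.
--
--     Lines inside fenced code blocks (```...```) are ignored.
--     """
--     lines = body.splitlines()
--     target = heading_text.strip().lower()
--     in_fence = False
--     for i, line in enumerate(lines):
--         stripped = line.strip()
--         if stripped.startswith("```"):
--             in_fence = not in_fence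
--             continue
--         if in_fence:
--             continue
--         if stripped.lower() == f"## {target}":
--             # Look for at least one non-blank, non-## line after this one.
--             # Must also ignore lines inside fenced code blocks in the content region.
--             follow_in_fence = False
--             for follow in lines[i + 1:]:
--                 fs = follow.strip()
--                 if fs.startswith("```"):
--                     follow_in_fence = not follow_in_fence
--                     # A fence-start line counts as non-blank non-heading content.
--                     if not follow_in_fence:
--                         # This was a fence close; keep scanning
--                         continue
--                     return True  # Fence-open as first content = valid
--                 if follow_in_fence:
--                     continue
--                 if not fs:
--                     continue
--                 if fs.startswith("##"):
--                     return False  # Next heading hit with no content between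
--                 return True
--             return False
--     return False
-- ===== SOURCE B (Python) =====
-- def body_has_heading(body: str, heading_text: str) -> bool:
--     # Single linear pass with two state flags instead of A's nested rescan of lines[i+1:].
--     target = "## " + heading_text.strip().lower()
--     in_fence = False
--     awaiting_content = False
--     for line in body.splitlines():
--         stripped = line.strip()
--         if stripped.startswith("```"):
--             if awaiting_content:
--                 return True  # fence-open counts as content
--             in_fence = not in_fence
--             continue
--         if in_fence:
--             continue
--         if awaiting_content:
--             if not stripped:
--                 continue
--             return not stripped.startswith("##")
--         if stripped.lower() == target:
--             awaiting_content = True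
--     return False
-- ===== Notes on version B (the rewrite author's own statement) =====
-- stated objective: simpler
-- what changed: Replaces A's nested scan (outer loop plus a fresh inner pass over lines[i+1:] after the matching heading) with one linear pass over the lines maintaining in_fence and awaiting_content flags; the dead fence-close branch of A's inner loop disappears.
import Mathlib
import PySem

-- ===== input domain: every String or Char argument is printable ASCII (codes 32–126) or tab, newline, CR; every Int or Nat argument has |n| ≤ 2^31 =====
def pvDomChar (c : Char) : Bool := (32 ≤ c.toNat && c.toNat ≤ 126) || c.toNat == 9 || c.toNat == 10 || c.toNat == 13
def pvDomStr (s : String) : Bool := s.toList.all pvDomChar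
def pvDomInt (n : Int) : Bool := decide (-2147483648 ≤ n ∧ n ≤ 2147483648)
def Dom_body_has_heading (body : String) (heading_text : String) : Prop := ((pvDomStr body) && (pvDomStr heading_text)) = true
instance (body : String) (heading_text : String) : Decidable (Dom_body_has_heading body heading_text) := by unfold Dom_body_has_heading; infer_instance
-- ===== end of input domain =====

-- B replaces A's nested rescan of lines[i+1:] after the matching heading with one
-- linear pass maintaining in_fence / awaiting_content flags (simpler decomposition).


-- ===== PORT A =====
-- inner loop: "for follow in lines[i+1:]" with state follow_in_fence
def pvAFollow : List String → Bool → Bool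
  | [], _ => false
  | follow :: rest, fif =>
    let fs := PySem.Str.strip follow
    if PySem.Str.startswith fs "```" then
      let fif' := !fif
      if fif' = false then pvAFollow rest fif'   -- fence close; keep scanning
      else true                                   -- fence-open as first content = valid
    else if fif then pvAFollow rest fif
    else if fs = "" then pvAFollow rest fif
    else if PySem.Str.startswith fs "##" then false
    else true

-- outer loop: "for i, line in enumerate(lines)" with state in_fence; lines[i+1:] is the tail
def pvALoop (target : String) : List String → Bool → Bool
  | [], _ => false
  | line :: rest, infc =>
    let stripped := PySem.Str.strip line
    if PySem.Str.startswith stripped "```" then pvALoop target rest (!infc)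
    else if infc then pvALoop target rest infc
    else if PySem.Str.lower stripped = "## " ++ target then pvAFollow rest false
    else pvALoop target rest infc

def body_has_heading (body : String) (heading_text : String) : Bool :=
  pvALoop (PySem.Str.lower (PySem.Str.strip heading_text)) (PySem.Str.splitlines body) false

-- ===== PORT B =====
-- single pass, state (in_fence, awaiting_content)
def pvBLoop (target : String) : List String → Bool → Bool → Bool
  | [], _, _ => false
  | line :: rest, infc, aw =>
    let stripped := PySem.Str.strip line
    if PySem.Str.startswith stripped "```" then
      if aw then true
      else pvBLoop target rest (!infc) aw
    else if infc then pvBLoop target rest infc aw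
    else if aw then
      if stripped = "" then pvBLoop target rest infc aw
      else !(PySem.Str.startswith stripped "##")
    else if PySem.Str.lower stripped = target then pvBLoop target rest infc true
    else pvBLoop target rest infc aw

def body_has_heading_alt (body : String) (heading_text : String) : Bool :=
  pvBLoop ("## " ++ PySem.Str.lower (PySem.Str.strip heading_text)) (PySem.Str.splitlines body) false false

-- ===== PRECONDITION & SPEC =====
def Spec_body_has_heading (body : String) (heading_text : String) (out : Bool) : Prop := out = body_has_heading_alt body heading_text
instance (body : String) (heading_text : String) (out : Bool) : Decidable (Spec_body_has_heading body heading_text out) := by unfold Spec_body_has_heading; infer_instance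

-- ===== CLAIM (what is proved, stated in full; the proofs are below) =====
def Claim_equal_body_has_heading : Prop := ∀ (body : String) (heading_text : String), Dom_body_has_heading body heading_text → Spec_body_has_heading body heading_text (body_has_heading body heading_text)

-- ===== LEMMAS AND PROOFS =====

-- After a matching heading (reached with in_fence = false), B's awaiting mode equals A's inner scan.
theorem pvB_await_eq_follow (target : String) (rest : List String) :
    pvBLoop target rest false true = pvAFollow rest false := by
  induction rest with
  | nil => rfl
  | cons l rs ih =>
    simp only [pvBLoop, pvAFollow]
    split_ifs with h1 h2 h3 <;> simp_all

-- Before a match, the two loops run in lockstep with the same fence state.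
theorem pvB_eq_A (target : String) (lines : List String) (infc : Bool) :
    pvBLoop ("## " ++ target) lines infc false = pvALoop target lines infc := by
  induction lines generalizing infc with
  | nil => rfl
  | cons l rs ih =>
    simp only [pvBLoop, pvALoop, Bool.false_eq_true, if_false]
    split_ifs with h1 h2 h3
    · exact ih (!infc)
    · exact ih infc
    · have hf : infc = false := by simpa using h2
      subst hf
      exact pvB_await_eq_follow _ rs
    · exact ih infc

-- ===== VERDICT (by name: the statement is the Claim_ definition above) =====
theorem body_has_heading_spec : Claim_equal_body_has_heading := by
  intro body heading_text _
  unfold Spec_body_has_heading body_has_heading body_has_heading_alt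
  exact (pvB_eq_A _ _ _).symm
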